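-- pv_equiv track=rewrite | github.com/shivangtripathi/bug-fix-agent | tools/ast_editor.py | _fallback_rewrite
-- ===== SOURCE A (Python) =====
-- def _fallback_rewrite(before: str, function_name: str, new_body: str) -> tuple[bool, str]:
--     """
--     Pure-text fallback rewriter used when libcst is not available.
--
--     Finds the OUTERMOST top-level `def <function_name>(` and replaces
--     its entire body with `new_body`.
--     """
--     lines = before.splitlines()
--     target = f"def {function_name}("
--     found_idx = -1
--
--     # Only match top-level functions (no leading whitespace) to avoid
--     # replacing nested functions of the same name
--     for idx, line in enumerate(lines):
--         stripped = line.lstrip()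
--         if stripped.startswith(target) and len(line) == len(stripped):
--             # Zero-indent → top-level function
--             found_idx = idx
--             break
--
--     if found_idx == -1:
--         # Retry: match the first occurrence at any indent level
--         for idx, line in enumerate(lines):
--             if line.lstrip().startswith(target):
--                 found_idx = idx
--                 break
--
--     if found_idx == -1:
--         return False, before
--
--     idx = found_idx
--     # Body indent = function indent + 4 spaces
--     func_indent = len(lines[idx]) - len(lines[idx].lstrip())
--     body_indent = " " * (func_indent + 4)
--
--     # Build replacement body lines
--     body_lines = [
--         f"{body_indent}{segment}"
--         for segment in new_body.splitlines()
--         if segment.strip()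
--     ]
--     if not body_lines:
--         body_lines = [f"{body_indent}pass"]
--
--     # Find where the old body ends: lines that are MORE indented than the
--     # function def, OR blank lines inside the body
--     end = idx + 1
--     while end < len(lines):
--         line = lines[end]
--         if line.strip() == "":
--             end += 1
--             continue
--         current_indent = len(line) - len(line.lstrip())
--         if current_indent > func_indent:
--             end += 1
--         else:
--             break
--
--     updated = lines[: idx + 1] + body_lines + lines[end:]
--     return True, "\n".join(updated) + "\n"
-- ===== SOURCE B (Python) =====
-- def _fallback_rewrite(before: str, function_name: str, new_body: str) -> tuple[bool, str]:
--     """Collect all matching def-lines in one enumerated pass, then pick the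
--     first top-level hit (falling back to the first hit); trim the old body by
--     dropping lines from the tail suffix instead of advancing an index."""
--     lines = before.splitlines()
--     target = f"def {function_name}("
--     hits = [(i, line) for i, line in enumerate(lines) if line.lstrip().startswith(target)]
--     if not hits:
--         return False, before
--     idx, header = next((p for p in hits if p[1] == p[1].lstrip()), hits[0])
--     indent = len(header) - len(header.lstrip())
--     pad = " " * (indent + 4)
--     body = [pad + seg for seg in new_body.splitlines() if seg.strip()]
--     if not body:
--         body = [pad + "pass"]
--     rest = lines[idx + 1:]
--     while rest and not (rest[0].strip() and len(rest[0]) - len(rest[0].lstrip()) <= indent):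
--         rest = rest[1:]
--     return True, "\n".join(lines[:idx + 1] + body + rest) + "\n"
-- ===== Notes on version B (the rewrite author's own statement) =====
-- stated objective: alternative
-- what changed: B replaces A's two sequential whole-file scan loops with one enumerated filter pass collecting all matching def-lines followed by a selection (first top-level hit, else first hit), and replaces A's index-advancing body-end while loop with a loop that drops lines off the tail suffix, splicing the retained suffix directly.
import Mathlib
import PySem

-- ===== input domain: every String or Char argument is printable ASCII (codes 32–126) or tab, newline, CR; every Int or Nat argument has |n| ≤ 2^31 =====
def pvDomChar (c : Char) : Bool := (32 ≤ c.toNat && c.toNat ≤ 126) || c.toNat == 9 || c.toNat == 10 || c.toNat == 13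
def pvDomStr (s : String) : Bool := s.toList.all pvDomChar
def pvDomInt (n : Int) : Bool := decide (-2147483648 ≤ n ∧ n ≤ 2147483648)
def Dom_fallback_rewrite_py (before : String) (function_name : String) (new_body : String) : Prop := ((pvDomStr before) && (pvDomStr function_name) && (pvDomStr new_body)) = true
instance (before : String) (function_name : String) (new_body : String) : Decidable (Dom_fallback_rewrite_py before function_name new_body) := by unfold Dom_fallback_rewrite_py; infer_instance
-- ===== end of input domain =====

-- B restructures A: one enumerated filter pass + a pick instead of two scan loops, and a
-- suffix-dropping loop instead of an index-advancing body-end loop (objective: alternative).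

-- ===== PORT A =====
-- first loop of A: first line whose lstrip startswith target AND has zero indent
def pvA_scanTop (target : List Char) : List (List Char) → Nat → Option Nat
  | [], _ => none
  | l :: ls, i =>
    let stripped := PySem.Chars.lstrip l
    if PySem.Chars.startswith stripped target && (l.length == stripped.length)
    then some i else pvA_scanTop target ls (i + 1)

-- retry loop of A: first line whose lstrip startswith target, any indent
def pvA_scanAny (target : List Char) : List (List Char) → Nat → Option Nat
  | [], _ => none
  | l :: ls, i =>
    if PySem.Chars.startswith (PySem.Chars.lstrip l) target
    then some i else pvA_scanAny target ls (i + 1)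

-- A's `while end < len(lines)` body-end loop, index-advancing
def pvA_endLoop (lines : List (List Char)) (fi : Nat) (e : Nat) : Nat :=
  if h : e < lines.length then
    let line := lines[e]
    if PySem.Chars.strip line == [] then pvA_endLoop lines fi (e + 1)
    else if line.length - (PySem.Chars.lstrip line).length > fi then pvA_endLoop lines fi (e + 1)
    else e
  else e
termination_by lines.length - e

def fallback_rewrite_py (before : String) (function_name : String) (new_body : String) : Bool × String :=
  let lines := PySem.Chars.splitlines before.toList
  let target := "def ".toList ++ function_name.toList ++ "(".toList
  let found := match pvA_scanTop target lines 0 with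
    | some i => some i
    | none => pvA_scanAny target lines 0
  match found with
  | none => (false, before)
  | some idx =>
    -- lines[idx]: idx is an index produced by the scans, always in range
    let header := (PySem.List.pyGet? lines (idx : Int)).getD []
    let funcIndent := header.length - (PySem.Chars.lstrip header).length
    let bodyIndent := List.replicate (funcIndent + 4) ' '   -- " " * (func_indent + 4)
    let bodyLines0 := ((PySem.Chars.splitlines new_body.toList).filter
        (fun seg => !(PySem.Chars.strip seg).isEmpty)).map (fun seg => bodyIndent ++ seg)
    let bodyLines := if bodyLines0.isEmpty then [bodyIndent ++ "pass".toList] else bodyLines0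
    let e := pvA_endLoop lines funcIndent (idx + 1)
    let updated := PySem.List.slice lines none (some ((idx : Int) + 1)) ++ bodyLines
        ++ PySem.List.slice lines (some ((e : Int))) none
    (true, String.mk (PySem.Chars.join ['\n'] updated ++ ['\n']))

-- ===== PORT B =====
-- next((p for p in hits if p[1] == p[1].lstrip()), hits[0])
def pvB_pick : List (Int × List Char) → Option (Int × List Char)
  | [] => none
  | p :: ps => if p.2 == PySem.Chars.lstrip p.2 then some p else pvB_pick ps

-- `while rest and not (rest[0].strip() and indent(rest[0]) <= fi): rest = rest[1:]`
def pvB_dropRest (fi : Nat) : List (List Char) → List (List Char)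
  | [] => []
  | l :: ls =>
    if !(!(PySem.Chars.strip l).isEmpty && decide (l.length - (PySem.Chars.lstrip l).length ≤ fi))
    then pvB_dropRest fi ls else l :: ls

def fallback_rewrite_py_alt (before : String) (function_name : String) (new_body : String) : Bool × String :=
  let lines := PySem.Chars.splitlines before.toList
  let target := "def ".toList ++ function_name.toList ++ "(".toList
  let hits := (PySem.List.enumerate lines 0).filter
      (fun p => PySem.Chars.startswith (PySem.Chars.lstrip p.2) target)
  match hits with
  | [] => (false, before)
  | h0 :: _ =>
    let sel := (pvB_pick hits).getD h0
    let header := sel.2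
    let indent := header.length - (PySem.Chars.lstrip header).length
    let pad := List.replicate (indent + 4) ' '   -- " " * (indent + 4)
    let body0 := ((PySem.Chars.splitlines new_body.toList).filter
        (fun seg => !(PySem.Chars.strip seg).isEmpty)).map (fun seg => pad ++ seg)
    let body := if body0.isEmpty then [pad ++ "pass".toList] else body0
    let rest := pvB_dropRest indent (PySem.List.slice lines (some (sel.1 + 1)) none)
    let updated := PySem.List.slice lines none (some (sel.1 + 1)) ++ body ++ rest
    (true, String.mk (PySem.Chars.join ['\n'] updated ++ ['\n']))

-- ===== PRECONDITION & SPEC =====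
def Spec_fallback_rewrite_py (before : String) (function_name : String) (new_body : String) (out : Bool × String) : Prop := out = fallback_rewrite_py_alt before function_name new_body
instance (before : String) (function_name : String) (new_body : String) (out : Bool × String) : Decidable (Spec_fallback_rewrite_py before function_name new_body out) := by unfold Spec_fallback_rewrite_py; infer_instance

-- ===== CLAIM (what is proved, stated in full; the proofs are below) =====
def Claim_equal_fallback_rewrite_py : Prop := ∀ (before : String) (function_name : String) (new_body : String), Dom_fallback_rewrite_py before function_name new_body → Spec_fallback_rewrite_py before function_name new_body (fallback_rewrite_py before function_name new_body)

-- ===== LEMMAS AND PROOFS =====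

-- Zero indent two ways: `len(line) == len(stripped)` (A) iff `line == line.lstrip()` (B)
theorem pv_top_eq (l : List Char) :
    (l.length == (PySem.Chars.lstrip l).length) = (l == PySem.Chars.lstrip l) := by
  have hs : PySem.Chars.lstrip l <:+ l := List.dropWhile_suffix _
  cases hq : (l == PySem.Chars.lstrip l) with
  | true =>
      have : l = PySem.Chars.lstrip l := by simpa using hq
      simp [← this]
  | false =>
      have hne : l ≠ PySem.Chars.lstrip l := by simpa using hq
      have : l.length ≠ (PySem.Chars.lstrip l).length := by
        intro h
        exact hne (hs.eq_of_length h.symm).symm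
      simpa using this

-- relation: A's index option vs B's (index, line) option, lookups into `full`
def pvRel (full : List (List Char)) : Option Nat → Option (Int × List Char) → Prop
  | none, none => True
  | some k, some p => p.1 = (k : Int) ∧ full[k]? = some p.2
  | _, _ => False

theorem pv_scanTop_pick (target : List Char) (full : List (List Char)) :
    ∀ (rest : List (List Char)) (i : Nat), rest = full.drop i →
    pvRel full (pvA_scanTop target rest i)
      (pvB_pick ((PySem.List.enumerate rest (i : Int)).filter
        (fun p => PySem.Chars.startswith (PySem.Chars.lstrip p.2) target))) := by
  intro rest
  induction rest with
  | nil => intro i _; simp [pvA_scanTop, pvB_pick, PySem.List.enumerate, pvRel]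
  | cons l ls ih =>
      intro i hdrop
      have hhead : full[i]? = some l := by
        rw [← List.head?_drop, ← hdrop]; rfl
      have htail : ls = full.drop (i + 1) := by
        have := congrArg List.tail hdrop
        simpa [List.tail_drop] using this
      rw [PySem.List.enumerate_cons]
      by_cases hm : PySem.Chars.startswith (PySem.Chars.lstrip l) target = true
      · by_cases ht : (l == PySem.Chars.lstrip l) = true
        · simp [pvA_scanTop, pvB_pick, hm, ht, pv_top_eq, pvRel, hhead]
        · have hA : (l.length == (PySem.Chars.lstrip l).length) = false := by
            rw [pv_top_eq]; simpa using ht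
          have := ih (i + 1) htail
          simpa [pvA_scanTop, pvB_pick, hm, ht, hA, Int.natCast_add] using this
      · have := ih (i + 1) htail
        simpa [pvA_scanTop, hm, Int.natCast_add] using this

theorem pv_scanAny_head (target : List Char) (full : List (List Char)) :
    ∀ (rest : List (List Char)) (i : Nat), rest = full.drop i →
    pvRel full (pvA_scanAny target rest i)
      (((PySem.List.enumerate rest (i : Int)).filter
        (fun p => PySem.Chars.startswith (PySem.Chars.lstrip p.2) target)).head?) := by
  intro rest
  induction rest with
  | nil => intro i _; simp [pvA_scanAny, PySem.List.enumerate, pvRel]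
  | cons l ls ih =>
      intro i hdrop
      have hhead : full[i]? = some l := by
        rw [← List.head?_drop, ← hdrop]; rfl
      have htail : ls = full.drop (i + 1) := by
        have := congrArg List.tail hdrop
        simpa [List.tail_drop] using this
      rw [PySem.List.enumerate_cons]
      by_cases hm : PySem.Chars.startswith (PySem.Chars.lstrip l) target = true
      · simp [pvA_scanAny, hm, pvRel, hhead]
      · have := ih (i + 1) htail
        simpa [pvA_scanAny, hm, Int.natCast_add] using this

theorem pv_endLoop_dropRest (full : List (List Char)) (fi : Nat) :
    ∀ e, full.drop (pvA_endLoop full fi e) = pvB_dropRest fi (full.drop e) := by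
  intro e
  induction e using pvA_endLoop.induct full fi with
  | case4 e h =>
      have hge : full.length ≤ e := by omega
      rw [pvA_endLoop]
      simp [List.drop_eq_nil_of_le, hge, pvB_dropRest, h]
  | case1 e h line hblk ih =>
      have hblk' : PySem.Chars.strip full[e] = [] := by simpa using hblk
      have hstep : pvA_endLoop full fi e = pvA_endLoop full fi (e + 1) := by
        rw [pvA_endLoop]; simp [h, hblk']
      have hcons : full.drop e = full[e] :: full.drop (e + 1) := List.drop_eq_getElem_cons h
      have hemp : (PySem.Chars.strip full[e]).isEmpty = true := by
        simp [hblk']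
      rw [hstep, ih, hcons, pvB_dropRest]
      simp [hemp]
  | case2 e h line hblk hind ih =>
      have hblk' : ¬ PySem.Chars.strip full[e] = [] := by simpa using hblk
      have hgt : fi < full[e].length - (PySem.Chars.lstrip full[e]).length := by
        simpa using hind
      have hstep : pvA_endLoop full fi e = pvA_endLoop full fi (e + 1) := by
        rw [pvA_endLoop]; simp [h, hblk', hgt]
      have hcons : full.drop e = full[e] :: full.drop (e + 1) := List.drop_eq_getElem_cons h
      have hle : (decide (full[e].length - (PySem.Chars.lstrip full[e]).length ≤ fi)) = false := by
        simp; omega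
      rw [hstep, ih, hcons, pvB_dropRest]
      simp
      intro _ h2
      exact absurd h2 (by omega)
  | case3 e h line hblk hind =>
      have hblk' : ¬ PySem.Chars.strip full[e] = [] := by simpa using hblk
      have hngt : ¬ fi < full[e].length - (PySem.Chars.lstrip full[e]).length := by
        simpa using hind
      have hstop : pvA_endLoop full fi e = e := by
        rw [pvA_endLoop]; simp [h, hblk', hngt]
      have hcons : full.drop e = full[e] :: full.drop (e + 1) := List.drop_eq_getElem_cons h
      have hne : (PySem.Chars.strip full[e]).isEmpty = false := by
        simpa using hblk'
      have hle : full[e].length - (PySem.Chars.lstrip full[e]).length ≤ fi := by omega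
      rw [hstop, hcons, pvB_dropRest]
      simp [hne, hle]

-- ===== VERDICT (by name: the statement is the Claim_ definition above) =====
theorem fallback_rewrite_py_spec : Claim_equal_fallback_rewrite_py := by
  intro before function_name new_body _
  unfold Spec_fallback_rewrite_py fallback_rewrite_py fallback_rewrite_py_alt
  set lines := PySem.Chars.splitlines before.toList with hlines
  set target := "def ".toList ++ function_name.toList ++ "(".toList with htarget
  have hT := pv_scanTop_pick target lines lines 0 (by simp)
  have hA := pv_scanAny_head target lines lines 0 (by simp)
  simp only [Nat.cast_zero] at hT hA
  set hits := (PySem.List.enumerate lines (0 : Int)).filter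
      (fun p => PySem.Chars.startswith (PySem.Chars.lstrip p.2) target) with hhits
  cases hhits' : hits with
  | nil =>
      rw [hhits'] at hT hA
      cases hsT : pvA_scanTop target lines 0 with
      | some k => rw [hsT] at hT; simp [pvB_pick, pvRel] at hT
      | none =>
        cases hsA : pvA_scanAny target lines 0 with
        | some k => rw [hsA] at hA; simp [pvRel] at hA
        | none => simp [hsT, hsA, ← hhits, hhits']
  | cons h0 hs =>
      rw [hhits'] at hT hA
      -- determine the selected pair and the corresponding A index
      have key : ∃ (k : Nat) (l : List Char),
          (match pvA_scanTop target lines 0 with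
            | some i => some i
            | none => pvA_scanAny target lines 0) = some k ∧
          (pvB_pick (h0 :: hs)).getD h0 = ((k : Int), l) ∧ lines[k]? = some l := by
        cases hsT : pvA_scanTop target lines 0 with
        | some k =>
            rw [hsT] at hT
            cases hp : pvB_pick (h0 :: hs) with
            | none => rw [hp] at hT; simp [pvRel] at hT
            | some p =>
                rw [hp] at hT
                obtain ⟨h1, h2⟩ := hT
                exact ⟨k, p.2, rfl, by simp; exact Prod.ext h1 rfl, h2⟩
        | none =>
            rw [hsT] at hT
            cases hp : pvB_pick (h0 :: hs) with
            | some p => rw [hp] at hT; simp [pvRel] at hT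
            | none =>
                cases hsA : pvA_scanAny target lines 0 with
                | none => rw [hsA] at hA; simp [pvRel] at hA
                | some k =>
                    rw [hsA] at hA
                    obtain ⟨h1, h2⟩ := hA
                    refine ⟨k, h0.2, rfl, by simp [← h1], h2⟩
      obtain ⟨k, l, hfound, hsel, hlook⟩ := key
      have hheader : (PySem.List.pyGet? lines ((k : Nat) : Int)).getD [] = l := by
        simp [hlook]
      have hconv : ((k : Int) + 1) = ((k + 1 : Nat) : Int) := by push_cast; ring
      have hrest := pv_endLoop_dropRest lines
        (l.length - (PySem.Chars.lstrip l).length) (k + 1)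
      simp only [← hhits, hhits', hfound, hsel, hheader, hconv,
        PySem.List.slice_from_natCast, PySem.List.slice_to_natCast, hrest]
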